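-- pv_equiv track=rewrite | github.com/satishjhanwer/assignments | Assignment 2/question1.py | check_if_tree_is_valid
-- ===== SOURCE A (Python) =====
-- from collections import deque, defaultdict
--
-- def check_if_tree_is_valid(n, edges):
--     if n == 1:
--         return True
--
--     # Build the adjacency list
--     adj_list = defaultdict(list)
--     for u, v in edges:
--         adj_list[u].append(v)
--         adj_list[v].append(u)
--
--     # Start BFS from the root node
--     root = edges[0][0]
--     queue = deque([(root, 0)])
--     visited = {root}
--
--     while queue:
--         node, level = queue.popleft()
--         # Check the condition for the current level
--         if (level % 2 == 0 and node % 2 == 0) or (level % 2 != 0 and node % 2 != 0):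
--             return False
--
--         for neighbor in adj_list[node]:
--             if neighbor not in visited:
--                 visited.add(neighbor)
--                 queue.append((neighbor, level + 1))
--
--     return True
-- ===== SOURCE B (Python) =====
-- from collections import defaultdict
--
-- def check_if_tree_is_valid(n, edges):
--     if n == 1:
--         return True
--
--     # Build the adjacency list
--     adj = defaultdict(list)
--     for u, v in edges:
--         adj[u].append(v)
--         adj[v].append(u)
--
--     root = edges[0][0]
--     # Distance-map fixpoint instead of a BFS queue: repeatedly sweep every
--     # node already in the map and add its unseen neighbours one level further
--     # out, until a sweep adds nothing; then test the node/level parity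
--     # constraint once over the finished map.  The level recorded for a node is
--     # its BFS distance from the root, so the answer matches the BFS check.
--     dist = {root: 0}
--     changed = True
--     while changed:
--         changed = False
--         for u in list(dist):
--             for nb in adj[u]:
--                 if nb not in dist:
--                     dist[nb] = dist[u] + 1
--                     changed = True
--     return not any(d % 2 == v % 2 for v, d in dist.items())
-- ===== Notes on version B (the rewrite author's own statement) =====
-- stated objective: alternative
-- what changed: Replaces the deque-based BFS with interleaved parity checks by a Bellman-Ford-style fixpoint: a node-to-level distance map grown by repeated full relaxation sweeps until stable, with the node/level parity constraint tested once over the finished map; Pre_ excludes empty edge lists with n != 1, on which both programs raise IndexError at edges[0][0].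
import Mathlib
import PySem

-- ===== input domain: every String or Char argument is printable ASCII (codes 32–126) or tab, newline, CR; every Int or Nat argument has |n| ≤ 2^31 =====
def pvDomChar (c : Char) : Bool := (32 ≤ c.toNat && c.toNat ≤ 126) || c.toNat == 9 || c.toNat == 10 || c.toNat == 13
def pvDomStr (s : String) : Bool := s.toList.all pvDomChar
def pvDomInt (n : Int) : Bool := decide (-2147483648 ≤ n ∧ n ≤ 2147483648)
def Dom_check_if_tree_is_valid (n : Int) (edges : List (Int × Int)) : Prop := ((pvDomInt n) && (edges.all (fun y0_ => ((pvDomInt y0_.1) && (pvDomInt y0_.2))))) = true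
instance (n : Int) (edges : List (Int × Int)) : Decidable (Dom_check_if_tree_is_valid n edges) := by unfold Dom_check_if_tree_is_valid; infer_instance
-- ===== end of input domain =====

-- B replaces A's BFS queue by a distance-map fixpoint: repeated full relaxation
-- sweeps build a node→level map, and the node/level parity constraint is tested
-- once over the finished map (alternative algorithm, not claimed faster).

-- ===== PORT A =====
-- Shared helper: both Pythons build the identical defaultdict adjacency list.
def pvBuildAdj (edges : List (Int × Int)) : PySem.Dict Int (List Int) :=
  edges.foldl (fun d p =>
    PySem.Dict.modify (PySem.Dict.modify d p.1 [] (fun l => l ++ [p.2])) p.2 [] (fun l => l ++ [p.1]))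
    PySem.Dict.empty

-- All endpoints occurring in `edges` (used only as a termination bound).
def pvNodes (edges : List (Int × Int)) : List Int :=
  PySem.Set.ofList ((edges.flatMap (fun p => [(p.1, p.2), (p.2, p.1)])).map (fun q => q.2))

-- Number of bound nodes not yet visited (termination measure component).
def pvUnvis (U : List Int) (v : List Int) : Nat :=
  (U.filter (fun x => !(PySem.Set.contains v x))).length

-- Termination-support lemmas, cited by the ports' `decreasing_by`.
lemma pvBuildAdj_eq (edges : List (Int × Int)) :
    pvBuildAdj edges
      = (edges.flatMap (fun p => [(p.1, p.2), (p.2, p.1)])).foldl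
          (fun d p => PySem.Dict.modify d p.1 [] (fun l => l ++ [p.2])) PySem.Dict.empty := by
  unfold pvBuildAdj
  generalize PySem.Dict.empty = d0
  induction edges generalizing d0 with
  | nil => simp
  | cons e rest ih => simp [List.foldl_cons, ih]

lemma pvAdj_vals (edges : List (Int × Int)) :
    ∀ k, ∀ x ∈ PySem.Dict.getD (pvBuildAdj edges) k [], x ∈ pvNodes edges := by
  intro k x hx
  rw [pvBuildAdj_eq] at hx
  rw [PySem.Dict.getD_foldl_modify_append] at hx
  simp only [PySem.Dict.getD_empty, List.nil_append, List.mem_map, List.mem_filter] at hx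
  obtain ⟨p, ⟨hp, _⟩, rfl⟩ := hx
  unfold pvNodes
  rw [PySem.Set.mem_ofList]
  exact List.mem_map.mpr ⟨p, hp, rfl⟩

lemma pvContains_append (v : List Int) (x : Int) :
    (fun y => !(PySem.Set.contains (v ++ [x]) y))
      = (fun y => (!(y == x)) && (!(PySem.Set.contains v y))) := by
  funext y
  by_cases hy : y = x <;> by_cases hv : y ∈ v <;>
    simp [PySem.Set.contains_eq_listContains, hy, hv]

lemma pvUnvis_add_lt (U v : List Int) (x : Int) (hU : x ∈ U)
    (hx : PySem.Set.contains v x = false) :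
    pvUnvis U (PySem.Set.add v x) < pvUnvis U v := by
  have hnm : x ∉ v := by simpa using hx
  rw [PySem.Set.add_of_not_mem hnm]
  unfold pvUnvis
  rw [pvContains_append, ← List.filter_filter]
  exact List.length_filter_lt_length_iff_exists.mpr
    ⟨x, List.mem_filter.mpr ⟨hU, by simpa using hnm⟩, by simp⟩

lemma pvFoldA_meas (U : List Int) (lvl : Int) :
    ∀ (nbs : List Int) (v : List Int) (q : List (Int × Int)),
    (∀ x ∈ nbs, x ∈ U) →
    2 * pvUnvis U ((nbs.foldl (fun (st : List Int × List (Int × Int)) nb =>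
        if PySem.Set.contains st.1 nb then st
        else (PySem.Set.add st.1 nb, st.2 ++ [(nb, lvl)])) (v, q)).1)
      + ((nbs.foldl (fun (st : List Int × List (Int × Int)) nb =>
        if PySem.Set.contains st.1 nb then st
        else (PySem.Set.add st.1 nb, st.2 ++ [(nb, lvl)])) (v, q)).2).length
      ≤ 2 * pvUnvis U v + q.length := by
  intro nbs
  induction nbs with
  | nil => intro v q _; simp
  | cons nb rest ih =>
    intro v q hsub
    simp only [List.foldl_cons]
    by_cases hc : PySem.Set.contains v nb = true
    · simp only [hc, if_pos]
      exact ih v q (fun x hx => hsub x (List.mem_cons_of_mem _ hx))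
    · have hc' : PySem.Set.contains v nb = false := by simpa using hc
      simp only [hc', Bool.false_eq_true, if_neg, not_false_iff]
      have h1 := ih (PySem.Set.add v nb) (q ++ [(nb, lvl)])
        (fun x hx => hsub x (List.mem_cons_of_mem _ hx))
      have h2 := pvUnvis_add_lt U v nb (hsub nb List.mem_cons_self) hc'
      simp only [List.length_append, List.length_cons, List.length_nil] at h1 ⊢
      omega

-- A's while-loop: pop (node, level) from the queue front, check, push unvisited
-- neighbours tagged level+1.  (U, h only bound the recursion; they carry no data.)
def pvBfsA (adj : PySem.Dict Int (List Int)) (U : List Int)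
    (h : ∀ k, ∀ x ∈ PySem.Dict.getD adj k [], x ∈ U)
    (visited : List Int) (queue : List (Int × Int)) : Bool :=
  match queue with
  | [] => true
  | (node, level) :: rest =>
    if (PySem.Int.mod level 2 == 0 && PySem.Int.mod node 2 == 0)
        || (PySem.Int.mod level 2 != 0 && PySem.Int.mod node 2 != 0) then false
    else
      let st := (PySem.Dict.getD adj node []).foldl
        (fun (st : List Int × List (Int × Int)) nb =>
          if PySem.Set.contains st.1 nb then st
          else (PySem.Set.add st.1 nb, st.2 ++ [(nb, level + 1)])) (visited, rest)
      pvBfsA adj U h st.1 st.2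
termination_by 2 * pvUnvis U visited + queue.length
decreasing_by
  have h1 := pvFoldA_meas U (level + 1) (PySem.Dict.getD adj node []) visited rest (h node)
  simp only [List.length_cons, dite_eq_ite]
  omega

def check_if_tree_is_valid (n : Int) (edges : List (Int × Int)) : Bool :=
  if n == 1 then true
  else
    match edges with
    | [] => true  -- Python raises IndexError at edges[0][0] here; excluded by Pre_
    | (u, _) :: _ =>
      pvBfsA (pvBuildAdj edges) (pvNodes edges) (pvAdj_vals edges)
        (PySem.Set.ofList [u]) [(u, 0)]

-- ===== PORT B =====
-- B's inner loop body: 'if nb not in dist: dist[nb] = dist[u] + 1; changed = True'.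
-- (dist[u] is read as getD u 0: u is always a key when this runs, so getD is exact.)
def pvStepB (u : Int) (st : PySem.Dict Int Int × Bool) (nb : Int) : PySem.Dict Int Int × Bool :=
  if st.1.contains nb then st else (st.1.insert nb (st.1.getD u 0 + 1), true)

-- Termination-support lemmas for pvFix, cited by its `decreasing_by`.
lemma pvUnvis_mono (U v1 v2 : List Int) (hsub : ∀ y, y ∈ v1 → y ∈ v2) :
    pvUnvis U v2 ≤ pvUnvis U v1 := by
  unfold pvUnvis
  have hf : (fun x => !(PySem.Set.contains v2 x))
      = (fun x => !(PySem.Set.contains v2 x) && !(PySem.Set.contains v1 x)) := by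
    funext x
    by_cases h2 : x ∈ v2
    · simp [PySem.Set.contains_eq_listContains, h2]
    · have h1 : x ∉ v1 := fun hx => h2 (hsub x hx)
      simp [PySem.Set.contains_eq_listContains, h1, h2]
  rw [hf, ← List.filter_filter]
  exact List.length_filter_le _ _

-- One relaxation sweep only appends fresh keys drawn from adj's values; the
-- changed flag records exactly whether anything was appended.
lemma pvStepBFold_ext (U : List Int) (u : Int) :
    ∀ (nbs : List Int), (∀ x ∈ nbs, x ∈ U) →
    ∀ (d : PySem.Dict Int Int) (flag : Bool),
    ∃ ext : List (Int × Int),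
      (nbs.foldl (pvStepB u) (d, flag)).1.items = d.items ++ ext ∧
      (nbs.foldl (pvStepB u) (d, flag)).2 = (flag || !ext.isEmpty) ∧
      ∀ p ∈ ext, p.1 ∈ U ∧ d.contains p.1 = false := by
  intro nbs
  induction nbs with
  | nil => exact fun _ d flag => ⟨[], by simp, by simp, by simp⟩
  | cons nb rest ih =>
    intro hU d flag
    simp only [List.foldl_cons, pvStepB]
    by_cases hc : d.contains nb = true
    · simp only [hc, if_pos]
      exact ih (fun x hx => hU x (List.mem_cons_of_mem _ hx)) d flag
    · have hc' : d.contains nb = false := by simpa using hc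
      simp only [hc', Bool.false_eq_true, if_neg, not_false_iff]
      obtain ⟨ext, h1, h2, h3⟩ :=
        ih (fun x hx => hU x (List.mem_cons_of_mem _ hx)) (d.insert nb (d.getD u 0 + 1)) true
      refine ⟨(nb, d.getD u 0 + 1) :: ext, ?_, ?_, ?_⟩
      · rw [h1, PySem.Dict.items_insert_of_not_contains _ _ hc']
        simp
      · rw [h2]; cases flag <;> simp
      · intro p hp
        rcases List.mem_cons.mp hp with rfl | hp'
        · exact ⟨hU nb List.mem_cons_self, hc'⟩
        · obtain ⟨hpU, hpc⟩ := h3 p hp'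
          rw [PySem.Dict.contains_insert] at hpc
          exact ⟨hpU, by simpa using (Bool.or_eq_false_iff.mp hpc).2⟩

lemma pvRoundFold_ext (adj : PySem.Dict Int (List Int)) (U : List Int)
    (h : ∀ k, ∀ x ∈ PySem.Dict.getD adj k [], x ∈ U) :
    ∀ (us : List Int) (d : PySem.Dict Int Int) (flag : Bool),
    ∃ ext : List (Int × Int),
      (us.foldl (fun st u => (PySem.Dict.getD adj u []).foldl (pvStepB u) st) (d, flag)).1.items
        = d.items ++ ext ∧
      (us.foldl (fun st u => (PySem.Dict.getD adj u []).foldl (pvStepB u) st) (d, flag)).2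
        = (flag || !ext.isEmpty) ∧
      ∀ p ∈ ext, p.1 ∈ U ∧ d.contains p.1 = false := by
  intro us
  induction us with
  | nil => exact fun d flag => ⟨[], by simp, by simp, by simp⟩
  | cons u rest ih =>
    intro d flag
    simp only [List.foldl_cons]
    obtain ⟨e1, g1, g2, g3⟩ := pvStepBFold_ext U u (PySem.Dict.getD adj u []) (h u) d flag
    obtain ⟨e2, k1, k2, k3⟩ :=
      ih ((PySem.Dict.getD adj u []).foldl (pvStepB u) (d, flag)).1
         ((PySem.Dict.getD adj u []).foldl (pvStepB u) (d, flag)).2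
    refine ⟨e1 ++ e2, ?_, ?_, ?_⟩
    · rw [show ((PySem.Dict.getD adj u []).foldl (pvStepB u) (d, flag)) =
          (((PySem.Dict.getD adj u []).foldl (pvStepB u) (d, flag)).1,
           ((PySem.Dict.getD adj u []).foldl (pvStepB u) (d, flag)).2) from rfl] at k1 ⊢
      rw [k1, g1, List.append_assoc]
    · rw [show ((PySem.Dict.getD adj u []).foldl (pvStepB u) (d, flag)) =
          (((PySem.Dict.getD adj u []).foldl (pvStepB u) (d, flag)).1,
           ((PySem.Dict.getD adj u []).foldl (pvStepB u) (d, flag)).2) from rfl] at k2 ⊢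
      rw [k2, g2]
      cases flag <;> cases e1 <;> cases e2 <;> simp
    · intro p hp
      rcases List.mem_append.mp hp with hp1 | hp2
      · exact g3 p hp1
      · obtain ⟨hpU, hpc⟩ := k3 p hp2
        refine ⟨hpU, ?_⟩
        by_contra hcd
        have hcd' : d.contains p.1 = true := by simpa using hcd
        have hmem : p.1 ∈ d.keys := (PySem.Dict.contains_iff_mem_keys d p.1).mp hcd'
        have hmem2 : p.1 ∈ ((PySem.Dict.getD adj u []).foldl (pvStepB u) (d, flag)).1.keys := by
          have : ((PySem.Dict.getD adj u []).foldl (pvStepB u) (d, flag)).1.keys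
              = d.keys ++ e1.map (fun q => q.1) := by
            simp only [PySem.Dict.keys, g1, List.map_append]
          rw [this]
          exact List.mem_append.mpr (Or.inl hmem)
        exact absurd ((PySem.Dict.contains_iff_mem_keys _ _).mpr hmem2) (by simp [hpc])

lemma pvFix_meas (adj : PySem.Dict Int (List Int)) (U : List Int)
    (h : ∀ k, ∀ x ∈ PySem.Dict.getD adj k [], x ∈ U) (d : PySem.Dict Int Int)
    (hflag : (d.keys.foldl (fun st u => (PySem.Dict.getD adj u []).foldl (pvStepB u) st) (d, false)).2 = true) :
    pvUnvis U (d.keys.foldl (fun st u => (PySem.Dict.getD adj u []).foldl (pvStepB u) st) (d, false)).1.keys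
      < pvUnvis U d.keys := by
  obtain ⟨ext, h1, h2, h3⟩ := pvRoundFold_ext adj U h d.keys d false
  rw [h2] at hflag
  cases ext with
  | nil => simp at hflag
  | cons p ps =>
    obtain ⟨hpU, hpc⟩ := h3 p List.mem_cons_self
    have hpk : p.1 ∉ d.keys := fun hm => by
      simp [(PySem.Dict.contains_iff_mem_keys d p.1).mpr hm] at hpc
    have hkeys : (d.keys.foldl (fun st u => (PySem.Dict.getD adj u []).foldl (pvStepB u) st) (d, false)).1.keys
        = d.keys ++ (p :: ps).map (fun q => q.1) := by
      simp only [PySem.Dict.keys] at h1 ⊢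
      rw [h1, List.map_append]
    calc pvUnvis U (d.keys.foldl (fun st u => (PySem.Dict.getD adj u []).foldl (pvStepB u) st) (d, false)).1.keys
        ≤ pvUnvis U (d.keys ++ [p.1]) := by
          apply pvUnvis_mono
          intro y hy
          rw [hkeys]
          rcases List.mem_append.mp hy with h' | h'
          · exact List.mem_append.mpr (Or.inl h')
          · simp only [List.mem_singleton] at h'
            subst h'
            exact List.mem_append.mpr (Or.inr (by simp))
      _ < pvUnvis U d.keys := by
          have := pvUnvis_add_lt U d.keys p.1 hpU (by simpa [PySem.Set.contains_eq_listContains] using hpk)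
          rwa [PySem.Set.add_of_not_mem hpk] at this

-- B's while-changed loop: sweep every key of the map, adding unseen neighbours
-- one level out, until a sweep changes nothing.  (U, h only bound the recursion.)
def pvFix (adj : PySem.Dict Int (List Int)) (U : List Int)
    (h : ∀ k, ∀ x ∈ PySem.Dict.getD adj k [], x ∈ U)
    (d : PySem.Dict Int Int) : PySem.Dict Int Int :=
  let st := d.keys.foldl (fun st u => (PySem.Dict.getD adj u []).foldl (pvStepB u) st) (d, false)
  if hst : st.2 then pvFix adj U h st.1 else st.1
termination_by pvUnvis U d.keys
decreasing_by exact pvFix_meas adj U h d hst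

def check_if_tree_is_valid_alt (n : Int) (edges : List (Int × Int)) : Bool :=
  if n == 1 then true
  else
    match edges with
    | [] => true  -- Python raises IndexError at edges[0][0] here; excluded by Pre_
    | (u, _) :: _ =>
      let dist := pvFix (pvBuildAdj edges) (pvNodes edges) (pvAdj_vals edges)
        (PySem.Dict.ofList [(u, 0)])
      !(dist.items.any (fun p => PySem.Int.mod p.2 2 == PySem.Int.mod p.1 2))

-- ===== PRECONDITION & SPEC =====
-- Pre_ excludes exactly the inputs on which both Pythons raise IndexError at
-- edges[0][0]: an empty edge list with n ≠ 1.
def Pre_check_if_tree_is_valid (n : Int) (edges : List (Int × Int)) : Prop := n = 1 ∨ edges ≠ []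
instance (n : Int) (edges : List (Int × Int)) : Decidable (Pre_check_if_tree_is_valid n edges) := by
  unfold Pre_check_if_tree_is_valid; infer_instance

def pvWitness_check_if_tree_is_valid : Int × (List (Int × Int)) := (3, [(1, 2), (2, 3)])

def Spec_check_if_tree_is_valid (n : Int) (edges : List (Int × Int)) (out : Bool) : Prop := out = check_if_tree_is_valid_alt n edges
instance (n : Int) (edges : List (Int × Int)) (out : Bool) : Decidable (Spec_check_if_tree_is_valid n edges out) := by unfold Spec_check_if_tree_is_valid; infer_instance

-- ===== CLAIM (what is proved, stated in full; the proofs are below) =====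
def Claim_equal_check_if_tree_is_valid : Prop := ∀ (n : Int) (edges : List (Int × Int)), Dom_check_if_tree_is_valid n edges → Pre_check_if_tree_is_valid n edges → Spec_check_if_tree_is_valid n edges (check_if_tree_is_valid n edges)

-- ===== LEMMAS AND PROOFS =====
lemma pvFoldBin_meas (U : List Int) :
    ∀ (nbs : List Int) (v : List Int) (acc : List Int),
    (∀ x ∈ nbs, x ∈ U) →
    pvUnvis U ((nbs.foldl (fun (st : List Int × List Int) nb =>
        if PySem.Set.contains st.1 nb then st
        else (PySem.Set.add st.1 nb, st.2 ++ [nb])) (v, acc)).1)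
      + ((nbs.foldl (fun (st : List Int × List Int) nb =>
        if PySem.Set.contains st.1 nb then st
        else (PySem.Set.add st.1 nb, st.2 ++ [nb])) (v, acc)).2).length
      ≤ pvUnvis U v + acc.length := by
  intro nbs
  induction nbs with
  | nil => intro v acc _; simp
  | cons nb rest ih =>
    intro v acc hsub
    simp only [List.foldl_cons]
    by_cases hc : PySem.Set.contains v nb = true
    · simp only [hc, if_pos]
      exact ih v acc (fun x hx => hsub x (List.mem_cons_of_mem _ hx))
    · have hc' : PySem.Set.contains v nb = false := by simpa using hc
      simp only [hc', Bool.false_eq_true, if_neg, not_false_iff]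
      have h1 := ih (PySem.Set.add v nb) (acc ++ [nb])
        (fun x hx => hsub x (List.mem_cons_of_mem _ hx))
      have h2 := pvUnvis_add_lt U v nb (hsub nb List.mem_cons_self) hc'
      simp only [List.length_append, List.length_cons, List.length_nil] at h1 ⊢
      omega

lemma pvFoldBout_meas (adj : PySem.Dict Int (List Int)) (U : List Int)
    (h : ∀ k, ∀ x ∈ PySem.Dict.getD adj k [], x ∈ U) :
    ∀ (fr : List Int) (v : List Int) (acc : List Int),
    pvUnvis U ((fr.foldl (fun (st : List Int × List Int) node =>
        (PySem.Dict.getD adj node []).foldl (fun (st : List Int × List Int) nb =>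
          if PySem.Set.contains st.1 nb then st
          else (PySem.Set.add st.1 nb, st.2 ++ [nb])) st) (v, acc)).1)
      + ((fr.foldl (fun (st : List Int × List Int) node =>
        (PySem.Dict.getD adj node []).foldl (fun (st : List Int × List Int) nb =>
          if PySem.Set.contains st.1 nb then st
          else (PySem.Set.add st.1 nb, st.2 ++ [nb])) st) (v, acc)).2).length
      ≤ pvUnvis U v + acc.length := by
  intro fr
  induction fr with
  | nil => intro v acc; simp
  | cons node rest ih =>
    intro v acc
    simp only [List.foldl_cons]
    have h1 := pvFoldBin_meas U (PySem.Dict.getD adj node []) v acc (h node)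
    have h2 := ih ((PySem.Dict.getD adj node []).foldl (fun (st : List Int × List Int) nb =>
          if PySem.Set.contains st.1 nb then st
          else (PySem.Set.add st.1 nb, st.2 ++ [nb])) (v, acc)).1
      ((PySem.Dict.getD adj node []).foldl (fun (st : List Int × List Int) nb =>
          if PySem.Set.contains st.1 nb then st
          else (PySem.Set.add st.1 nb, st.2 ++ [nb])) (v, acc)).2
    simp only [Prod.mk.eta] at h2
    omega

-- Proof-side reference program: level-synchronous frontier BFS; A is proved
-- equal to it (pvMain) and B's fixpoint is proved equal to it too (pvMainB).
def pvBfsF (adj : PySem.Dict Int (List Int)) (U : List Int)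
    (h : ∀ k, ∀ x ∈ PySem.Dict.getD adj k [], x ∈ U)
    (visited : List Int) (frontier : List Int) (level : Int) : Bool :=
  if frontier.isEmpty then true
  else if frontier.any (fun node =>
      (PySem.Int.mod level 2 == 0) == (PySem.Int.mod node 2 == 0)) then false
  else
    let st := frontier.foldl (fun (st : List Int × List Int) node =>
        (PySem.Dict.getD adj node []).foldl (fun (st : List Int × List Int) nb =>
          if PySem.Set.contains st.1 nb then st
          else (PySem.Set.add st.1 nb, st.2 ++ [nb])) st) (visited, [])
    pvBfsF adj U h st.1 st.2 (level + 1)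
termination_by 2 * pvUnvis U visited + frontier.length
decreasing_by
  have h1 := pvFoldBout_meas adj U h frontier visited []
  have h3 : frontier.length ≠ 0 := by
    intro h0
    simp [List.length_eq_zero_iff.mp h0] at *
  simp only [List.length_nil, dite_eq_ite] at h1 ⊢
  rw [List.foldl_attach (f := fun (st : List Int × List Int) node =>
    List.foldl (fun (st : List Int × List Int) nb =>
      if PySem.Set.contains st.1 nb then st
      else (PySem.Set.add st.1 nb, st.2 ++ [nb])) st (PySem.Dict.getD adj node []))]
  omega

-- A's violation test equals the frontier form's parity-equality test, node by node.
lemma pvBad_eq (node l : Int) :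
    ((PySem.Int.mod l 2 == 0 && PySem.Int.mod node 2 == 0)
      || (PySem.Int.mod l 2 != 0 && PySem.Int.mod node 2 != 0))
    = ((PySem.Int.mod l 2 == 0) == (PySem.Int.mod node 2 == 0)) := by
  simp only [bne]
  generalize (PySem.Int.mod l 2 == 0) = a
  generalize (PySem.Int.mod node 2 == 0) = b
  revert a b; decide

-- A's neighbour push over a queue `q0 ++ ns@l` is the frontier form's neighbour
-- push over `ns`, with the new nodes tagged `l` at the end.
lemma pvPush (l : Int) :
    ∀ (nbs : List Int) (v : List Int) (q0 : List (Int × Int)) (ns : List Int),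
    nbs.foldl (fun (st : List Int × List (Int × Int)) nb =>
        if PySem.Set.contains st.1 nb then st
        else (PySem.Set.add st.1 nb, st.2 ++ [(nb, l)]))
      (v, q0 ++ ns.map (fun x => (x, l)))
    = ((nbs.foldl (fun (st : List Int × List Int) nb =>
          if PySem.Set.contains st.1 nb then st
          else (PySem.Set.add st.1 nb, st.2 ++ [nb])) (v, ns)).1,
       q0 ++ ((nbs.foldl (fun (st : List Int × List Int) nb =>
          if PySem.Set.contains st.1 nb then st
          else (PySem.Set.add st.1 nb, st.2 ++ [nb])) (v, ns)).2).map (fun x => (x, l))) := by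
  intro nbs
  induction nbs with
  | nil => intro v q0 ns; simp
  | cons nb rest ih =>
    intro v q0 ns
    simp only [List.foldl_cons]
    by_cases hc : PySem.Set.contains v nb = true
    · simp only [hc, if_pos]
      exact ih v q0 ns
    · have hc' : PySem.Set.contains v nb = false := by simpa using hc
      simp only [hc', Bool.false_eq_true, if_neg, not_false_iff]
      have : (q0 ++ ns.map (fun x => (x, l))) ++ [(nb, l)]
          = q0 ++ (ns ++ [nb]).map (fun x => (x, l)) := by
        simp [List.map_append]
      rw [this]
      exact ih (PySem.Set.add v nb) q0 (ns ++ [nb])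

-- A on a queue holding frontier `cur` at level l followed by `acc` at level l+1
-- checks all of `cur`, then continues on the expanded queue.
lemma pvL (adj : PySem.Dict Int (List Int)) (U : List Int)
    (h : ∀ k, ∀ x ∈ PySem.Dict.getD adj k [], x ∈ U) :
    ∀ (cur v acc : List Int) (l : Int),
    pvBfsA adj U h v (cur.map (fun x => (x, l)) ++ acc.map (fun x => (x, l + 1)))
    = if cur.any (fun node => (PySem.Int.mod l 2 == 0) == (PySem.Int.mod node 2 == 0)) then false
      else
        pvBfsA adj U h
          (cur.foldl (fun (st : List Int × List Int) node =>
            (PySem.Dict.getD adj node []).foldl (fun (st : List Int × List Int) nb =>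
              if PySem.Set.contains st.1 nb then st
              else (PySem.Set.add st.1 nb, st.2 ++ [nb])) st) (v, acc)).1
          (((cur.foldl (fun (st : List Int × List Int) node =>
            (PySem.Dict.getD adj node []).foldl (fun (st : List Int × List Int) nb =>
              if PySem.Set.contains st.1 nb then st
              else (PySem.Set.add st.1 nb, st.2 ++ [nb])) st) (v, acc)).2).map (fun x => (x, l + 1))) := by
  intro cur
  induction cur with
  | nil => intro v acc l; simp
  | cons x cs ih =>
    intro v acc l
    simp only [List.map_cons, List.cons_append]
    rw [pvBfsA]
    rw [pvBad_eq]
    by_cases hb : ((PySem.Int.mod l 2 == 0) == (PySem.Int.mod x 2 == 0)) = true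
    · simp only [hb, if_true, List.any_cons, Bool.true_or]
    · have hb' : ((PySem.Int.mod l 2 == 0) == (PySem.Int.mod x 2 == 0)) = false := by
        simpa using hb
      simp only [hb', Bool.false_eq_true, if_neg, not_false_iff, List.any_cons, Bool.false_or]
      rw [pvPush (l + 1) (PySem.Dict.getD adj x []) v (cs.map (fun x => (x, l))) acc]
      simp only []
      rw [ih]
      simp only [List.foldl_cons, Prod.mk.eta]

-- A's queue BFS equals the frontier form, by strong induction on the measure.
lemma pvMain (adj : PySem.Dict Int (List Int)) (U : List Int)
    (h : ∀ k, ∀ x ∈ PySem.Dict.getD adj k [], x ∈ U) :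
    ∀ (N : Nat) (v cur : List Int) (l : Int),
    2 * pvUnvis U v + cur.length ≤ N →
    pvBfsA adj U h v (cur.map (fun x => (x, l))) = pvBfsF adj U h v cur l := by
  intro N
  induction N using Nat.strong_induction_on with
  | _ N IH =>
    intro v cur l hN
    rw [pvBfsF]
    cases cur with
    | nil =>
      simp only [List.map_nil, List.isEmpty_nil, if_true]
      rw [pvBfsA]
    | cons x cs =>
      simp only [List.isEmpty_cons, Bool.false_eq_true, if_neg, not_false_iff]
      have hL := pvL adj U h (x :: cs) v [] l
      simp only [List.map_nil, List.append_nil] at hL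
      rw [hL]
      by_cases ha : ((x :: cs).any fun node =>
          (PySem.Int.mod l 2 == 0) == (PySem.Int.mod node 2 == 0)) = true
      · simp only [ha, if_true]
      · have ha' : ((x :: cs).any fun node =>
            (PySem.Int.mod l 2 == 0) == (PySem.Int.mod node 2 == 0)) = false := by simpa using ha
        simp only [ha', Bool.false_eq_true, if_neg, not_false_iff]
        have hm := pvFoldBout_meas adj U h (x :: cs) v []
        simp only [List.length_nil] at hm
        apply IH (2 * pvUnvis U (((x :: cs).foldl (fun (st : List Int × List Int) node =>
            (PySem.Dict.getD adj node []).foldl (fun (st : List Int × List Int) nb =>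
              if PySem.Set.contains st.1 nb then st
              else (PySem.Set.add st.1 nb, st.2 ++ [nb])) st) (v, [])).1)
          + ((x :: cs).foldl (fun (st : List Int × List Int) node =>
            (PySem.Dict.getD adj node []).foldl (fun (st : List Int × List Int) nb =>
              if PySem.Set.contains st.1 nb then st
              else (PySem.Set.add st.1 nb, st.2 ++ [nb])) st) (v, [])).2.length)
        · simp only [List.length_cons] at hN
          omega
        · exact le_refl _

-- The level/node parity test written on pairs (as B's final any) agrees with
-- the frontier form's per-node test.
lemma pvBad2 (x l : Int) :
    ((PySem.Int.mod l 2 == 0) == (PySem.Int.mod x 2 == 0))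
      = (PySem.Int.mod l 2 == PySem.Int.mod x 2) := by
  rcases PySem.Int.mod_two_eq l with h | h <;> rcases PySem.Int.mod_two_eq x with h2 | h2 <;>
    simp only [h, h2] <;> decide

-- A sweep over neighbours that are all already keys changes nothing.
lemma pvNoopIn (u : Int) :
    ∀ (nbs : List Int) (bd : PySem.Dict Int Int) (flag : Bool),
    (∀ w ∈ nbs, bd.contains w = true) →
    nbs.foldl (pvStepB u) (bd, flag) = (bd, flag) := by
  intro nbs
  induction nbs with
  | nil => intro bd flag _; rfl
  | cons nb rest ih =>
    intro bd flag hall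
    simp only [List.foldl_cons, pvStepB, hall nb List.mem_cons_self, if_pos]
    exact ih bd flag (fun w hw => hall w (List.mem_cons_of_mem _ hw))

-- A sweep over keys whose whole neighbourhoods are already keys changes nothing.
lemma pvNoopMany (adj : PySem.Dict Int (List Int)) :
    ∀ (us : List Int) (bd : PySem.Dict Int Int) (flag : Bool),
    (∀ u ∈ us, ∀ w ∈ PySem.Dict.getD adj u [], bd.contains w = true) →
    us.foldl (fun st u => (PySem.Dict.getD adj u []).foldl (pvStepB u) st) (bd, flag) = (bd, flag) := by
  intro us
  induction us with
  | nil => intro bd flag _; rfl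
  | cons u rest ih =>
    intro bd flag hall
    simp only [List.foldl_cons]
    rw [pvNoopIn u _ bd flag (hall u List.mem_cons_self)]
    exact ih bd flag (fun v hv => hall v (List.mem_cons_of_mem _ hv))

-- A-side expansion fold: the visited set only grows (inner and outer), and
-- after a node is processed its whole neighbourhood is in the visited set.
lemma pvAMonoIn :
    ∀ (nbs : List Int) (st : List Int × List Int) (y : Int), y ∈ st.1 →
    y ∈ (nbs.foldl (fun (st : List Int × List Int) nb =>
        if PySem.Set.contains st.1 nb then st
        else (PySem.Set.add st.1 nb, st.2 ++ [nb])) st).1 := by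
  intro nbs
  induction nbs with
  | nil => exact fun st y hy => hy
  | cons nb rest ih =>
    intro st y hy
    simp only [List.foldl_cons]
    by_cases hc : PySem.Set.contains st.1 nb = true
    · simp only [hc, if_pos]; exact ih st y hy
    · simp only [(by simpa using hc : PySem.Set.contains st.1 nb = false),
        Bool.false_eq_true, if_neg, not_false_iff]
      exact ih _ y ((PySem.Set.mem_add st.1 nb y).mpr (Or.inl hy))

lemma pvACoverIn :
    ∀ (nbs : List Int) (st : List Int × List Int), ∀ w ∈ nbs,
    w ∈ (nbs.foldl (fun (st : List Int × List Int) nb =>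
        if PySem.Set.contains st.1 nb then st
        else (PySem.Set.add st.1 nb, st.2 ++ [nb])) st).1 := by
  intro nbs
  induction nbs with
  | nil => intro st w hw; simp at hw
  | cons nb rest ih =>
    intro st w hw
    simp only [List.foldl_cons]
    rcases List.mem_cons.mp hw with rfl | hw'
    · by_cases hc : PySem.Set.contains st.1 w = true
      · simp only [hc, if_pos]
        exact pvAMonoIn rest st w (by simpa [PySem.Set.contains_eq_listContains] using hc)
      · simp only [(by simpa using hc : PySem.Set.contains st.1 w = false),
          Bool.false_eq_true, if_neg, not_false_iff]
        exact pvAMonoIn rest _ w ((PySem.Set.mem_add st.1 w w).mpr (Or.inr rfl))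
    · by_cases hc : PySem.Set.contains st.1 nb = true
      · simp only [hc, if_pos]; exact ih st w hw'
      · simp only [(by simpa using hc : PySem.Set.contains st.1 nb = false),
          Bool.false_eq_true, if_neg, not_false_iff]
        exact ih _ w hw'

lemma pvAMonoOut (adj : PySem.Dict Int (List Int)) :
    ∀ (fr : List Int) (st : List Int × List Int) (y : Int), y ∈ st.1 →
    y ∈ (fr.foldl (fun (st : List Int × List Int) node =>
        (PySem.Dict.getD adj node []).foldl (fun (st : List Int × List Int) nb =>
          if PySem.Set.contains st.1 nb then st
          else (PySem.Set.add st.1 nb, st.2 ++ [nb])) st) st).1 := by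
  intro fr
  induction fr with
  | nil => exact fun st y hy => hy
  | cons node rest ih =>
    intro st y hy
    simp only [List.foldl_cons]
    exact ih _ y (pvAMonoIn (PySem.Dict.getD adj node []) st y hy)

lemma pvACovers (adj : PySem.Dict Int (List Int)) :
    ∀ (fr : List Int) (st : List Int × List Int), ∀ x ∈ fr, ∀ w ∈ PySem.Dict.getD adj x [],
    w ∈ (fr.foldl (fun (st : List Int × List Int) node =>
        (PySem.Dict.getD adj node []).foldl (fun (st : List Int × List Int) nb =>
          if PySem.Set.contains st.1 nb then st
          else (PySem.Set.add st.1 nb, st.2 ++ [nb])) st) st).1 := by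
  intro fr
  induction fr with
  | nil => intro st x hx; simp at hx
  | cons node rest ih =>
    intro st x hx w hw
    simp only [List.foldl_cons]
    rcases List.mem_cons.mp hx with rfl | hx'
    · exact pvAMonoOut adj rest _ w (pvACoverIn (PySem.Dict.getD adj x []) st w hw)
    · exact ih _ x hx' w hw

-- Inner simulation: B's neighbour sweep for one frontier node u mirrors the
-- A-side expansion fold, item for item and key for key.
lemma pvInnerSim (l u : Int) :
    ∀ (nbs : List Int) (bd : PySem.Dict Int Int) (nf : List Int) (flag : Bool)
      (base : List (Int × Int)),
    bd.keys.Nodup →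
    bd.items = base ++ nf.map (fun x => (x, l + 1)) →
    flag = !nf.isEmpty →
    bd.get? u = some l →
    ((nbs.foldl (pvStepB u) (bd, flag)).1.items
        = base ++ ((nbs.foldl (fun (st : List Int × List Int) nb =>
            if PySem.Set.contains st.1 nb then st
            else (PySem.Set.add st.1 nb, st.2 ++ [nb])) (bd.keys, nf)).2).map (fun x => (x, l + 1)))
    ∧ (nbs.foldl (pvStepB u) (bd, flag)).1.keys
        = (nbs.foldl (fun (st : List Int × List Int) nb =>
            if PySem.Set.contains st.1 nb then st
            else (PySem.Set.add st.1 nb, st.2 ++ [nb])) (bd.keys, nf)).1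
    ∧ (nbs.foldl (pvStepB u) (bd, flag)).2
        = !((nbs.foldl (fun (st : List Int × List Int) nb =>
            if PySem.Set.contains st.1 nb then st
            else (PySem.Set.add st.1 nb, st.2 ++ [nb])) (bd.keys, nf)).2).isEmpty
    ∧ (nbs.foldl (pvStepB u) (bd, flag)).1.keys.Nodup
    ∧ (∀ x j, bd.get? x = some j → (nbs.foldl (pvStepB u) (bd, flag)).1.get? x = some j) := by
  intro nbs
  induction nbs with
  | nil =>
    intro bd nf flag base hnd hitems hflag hu
    exact ⟨hitems, rfl, hflag, hnd, fun x j hx => hx⟩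
  | cons nb rest ih =>
    intro bd nf flag base hnd hitems hflag hu
    simp only [List.foldl_cons, pvStepB]
    by_cases hm : nb ∈ bd.keys
    · have hcB : bd.contains nb = true := (PySem.Dict.contains_iff_mem_keys bd nb).mpr hm
      have hcA : PySem.Set.contains bd.keys nb = true := by
        simpa [PySem.Set.contains_eq_listContains] using hm
      simp only [hcB, hcA, if_pos]
      exact ih bd nf flag base hnd hitems hflag hu
    · have hcB : bd.contains nb = false := by
        by_contra hx
        exact hm ((PySem.Dict.contains_iff_mem_keys bd nb).mp (by simpa using hx))
      have hcA : PySem.Set.contains bd.keys nb = false := by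
        simpa [PySem.Set.contains_eq_listContains] using hm
      simp only [hcB, hcA, Bool.false_eq_true, if_neg, not_false_iff]
      have hval : bd.getD u 0 = l := PySem.Dict.getD_of_get?_eq_some bd 0 hu
      have hkeys' : (bd.insert nb (bd.getD u 0 + 1)).keys = bd.keys ++ [nb] :=
        PySem.Dict.keys_insert_of_not_contains bd _ hcB
      have hadd : PySem.Set.add bd.keys nb = bd.keys ++ [nb] := PySem.Set.add_of_not_mem hm
      have hund : u ≠ nb := by
        intro hun
        subst hun
        have hct : bd.contains u = true := by
          rw [PySem.Dict.contains_eq_isSome_get?, hu]; rfl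
        rw [hct] at hcB; exact absurd hcB (by decide)
      have hgetpres : ∀ x j, bd.get? x = some j → (bd.insert nb (bd.getD u 0 + 1)).get? x = some j := by
        intro x j hx
        have hxne : x ≠ nb := by
          intro hxe
          subst hxe
          have hct : bd.contains x = true := by
            rw [PySem.Dict.contains_eq_isSome_get?, hx]; rfl
          rw [hct] at hcB; exact absurd hcB (by decide)
        rw [PySem.Dict.get?_insert_of_ne bd _ hxne]; exact hx
      obtain ⟨c1, c2, c3, c4, c5⟩ := ih (bd.insert nb (bd.getD u 0 + 1)) (nf ++ [nb]) true base
        (by rw [hkeys']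
            exact hnd.append (List.nodup_singleton nb) (List.disjoint_singleton.mpr hm))
        (by rw [PySem.Dict.items_insert_of_not_contains bd _ hcB, hitems, hval]
            simp [List.map_append])
        (by simp)
        (hgetpres u l hu)
      rw [hadd, ← hkeys']
      exact ⟨c1, c2, c3, c4, fun x j hx => c5 x j (hgetpres x j hx)⟩

-- Outer simulation: B's sweep over the current frontier keys mirrors the
-- A-side outer expansion fold.
lemma pvOuterSim (adj : PySem.Dict Int (List Int)) (l : Int) :
    ∀ (fr : List Int) (bd : PySem.Dict Int Int) (nf : List Int) (flag : Bool)
      (base : List (Int × Int)),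
    bd.keys.Nodup →
    bd.items = base ++ nf.map (fun x => (x, l + 1)) →
    flag = !nf.isEmpty →
    (∀ x ∈ fr, bd.get? x = some l) →
    ((fr.foldl (fun st u => (PySem.Dict.getD adj u []).foldl (pvStepB u) st) (bd, flag)).1.items
        = base ++ ((fr.foldl (fun (st : List Int × List Int) node =>
            (PySem.Dict.getD adj node []).foldl (fun (st : List Int × List Int) nb =>
              if PySem.Set.contains st.1 nb then st
              else (PySem.Set.add st.1 nb, st.2 ++ [nb])) st) (bd.keys, nf)).2).map (fun x => (x, l + 1)))
    ∧ (fr.foldl (fun st u => (PySem.Dict.getD adj u []).foldl (pvStepB u) st) (bd, flag)).1.keys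
        = (fr.foldl (fun (st : List Int × List Int) node =>
            (PySem.Dict.getD adj node []).foldl (fun (st : List Int × List Int) nb =>
              if PySem.Set.contains st.1 nb then st
              else (PySem.Set.add st.1 nb, st.2 ++ [nb])) st) (bd.keys, nf)).1
    ∧ (fr.foldl (fun st u => (PySem.Dict.getD adj u []).foldl (pvStepB u) st) (bd, flag)).2
        = !((fr.foldl (fun (st : List Int × List Int) node =>
            (PySem.Dict.getD adj node []).foldl (fun (st : List Int × List Int) nb =>
              if PySem.Set.contains st.1 nb then st
              else (PySem.Set.add st.1 nb, st.2 ++ [nb])) st) (bd.keys, nf)).2).isEmpty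
    ∧ (fr.foldl (fun st u => (PySem.Dict.getD adj u []).foldl (pvStepB u) st) (bd, flag)).1.keys.Nodup
    ∧ (∀ x j, bd.get? x = some j →
        (fr.foldl (fun st u => (PySem.Dict.getD adj u []).foldl (pvStepB u) st) (bd, flag)).1.get? x = some j) := by
  intro fr
  induction fr with
  | nil =>
    intro bd nf flag base hnd hitems hflag _
    exact ⟨hitems, rfl, hflag, hnd, fun x j hx => hx⟩
  | cons u rest ih =>
    intro bd nf flag base hnd hitems hflag hfr
    simp only [List.foldl_cons]
    obtain ⟨c1, c2, c3, c4, c5⟩ :=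
      pvInnerSim l u (PySem.Dict.getD adj u []) bd nf flag base hnd hitems hflag
        (hfr u List.mem_cons_self)
    obtain ⟨d1, d2, d3, d4, d5⟩ :=
      ih ((PySem.Dict.getD adj u []).foldl (pvStepB u) (bd, flag)).1
        (((PySem.Dict.getD adj u []).foldl (fun (st : List Int × List Int) nb =>
            if PySem.Set.contains st.1 nb then st
            else (PySem.Set.add st.1 nb, st.2 ++ [nb])) (bd.keys, nf)).2)
        ((PySem.Dict.getD adj u []).foldl (pvStepB u) (bd, flag)).2
        base c4 c1 c3
        (fun x hx => c5 x l (hfr x (List.mem_cons_of_mem _ hx)))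
    have heta : ((PySem.Dict.getD adj u []).foldl (pvStepB u) (bd, flag))
        = (((PySem.Dict.getD adj u []).foldl (pvStepB u) (bd, flag)).1,
           ((PySem.Dict.getD adj u []).foldl (pvStepB u) (bd, flag)).2) := rfl
    have hetaA : ((PySem.Dict.getD adj u []).foldl (fun (st : List Int × List Int) nb =>
            if PySem.Set.contains st.1 nb then st
            else (PySem.Set.add st.1 nb, st.2 ++ [nb])) (bd.keys, nf))
        = (((PySem.Dict.getD adj u []).foldl (pvStepB u) (bd, flag)).1.keys,
           ((PySem.Dict.getD adj u []).foldl (fun (st : List Int × List Int) nb =>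
            if PySem.Set.contains st.1 nb then st
            else (PySem.Set.add st.1 nb, st.2 ++ [nb])) (bd.keys, nf)).2) := by
      rw [c2]
    rw [heta, hetaA]
    exact ⟨d1, d2, d3, d4, fun x j hx => d5 x j (c5 x j hx)⟩

-- The fixpoint only ever appends items.
lemma pvFix_items_prefix (adj : PySem.Dict Int (List Int)) (U : List Int)
    (h : ∀ k, ∀ x ∈ PySem.Dict.getD adj k [], x ∈ U) :
    ∀ (N : Nat) (d : PySem.Dict Int Int), pvUnvis U d.keys ≤ N →
    ∃ rest, (pvFix adj U h d).items = d.items ++ rest := by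
  intro N
  induction N using Nat.strong_induction_on with
  | _ N IH =>
    intro d hN
    rw [pvFix]
    obtain ⟨ext, h1, h2, _⟩ := pvRoundFold_ext adj U h d.keys d false
    by_cases hc : (d.keys.foldl (fun st u => (PySem.Dict.getD adj u []).foldl (pvStepB u) st) (d, false)).2 = true
    · rw [dif_pos hc]
      have hlt := pvFix_meas adj U h d hc
      obtain ⟨rest, hrest⟩ := IH (pvUnvis U
        (d.keys.foldl (fun st u => (PySem.Dict.getD adj u []).foldl (pvStepB u) st) (d, false)).1.keys)
        (by omega) _ (le_refl _)
      exact ⟨ext ++ rest, by rw [hrest, h1, List.append_assoc]⟩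
    · rw [dif_neg hc]
      exact ⟨ext, h1⟩

-- Main simulation: the parity check over B's finished map equals (modulo the
-- already-accumulated items) the frontier BFS verdict.
lemma pvMainB (adj : PySem.Dict Int (List Int)) (U : List Int)
    (h : ∀ k, ∀ x ∈ PySem.Dict.getD adj k [], x ∈ U) :
    ∀ (N : Nat) (d : PySem.Dict Int Int) (fr : List Int) (l : Int) (base : List (Int × Int)),
    2 * pvUnvis U d.keys + fr.length ≤ N →
    d.keys.Nodup →
    d.items = base ++ fr.map (fun x => (x, l)) →
    (∀ p ∈ base, ∀ w ∈ PySem.Dict.getD adj p.1 [], w ∈ d.keys) →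
    (pvFix adj U h d).items.any (fun p => PySem.Int.mod p.2 2 == PySem.Int.mod p.1 2)
      = (base.any (fun p => PySem.Int.mod p.2 2 == PySem.Int.mod p.1 2)
          || !(pvBfsF adj U h d.keys fr l)) := by
  intro N
  induction N using Nat.strong_induction_on with
  | _ N IH =>
    intro d fr l base hN hnd hitems hclosed
    have hfrget : ∀ x ∈ fr, d.get? x = some l := by
      intro x hx
      refine PySem.Dict.get?_of_mem_items d ?_ hnd
      rw [hitems]
      exact List.mem_append.mpr (Or.inr (List.mem_map.mpr ⟨x, hx, rfl⟩))
    have hkeys : d.keys = base.map (fun p => p.1) ++ fr := by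
      simp only [PySem.Dict.keys, hitems, List.map_append, List.map_map]
      congr 1
      have hcomp : ((fun p : Int × Int => p.1) ∘ (fun x : Int => (x, l))) = fun x : Int => x := rfl
      rw [hcomp]
      exact List.map_id_fun' ▸ rfl
    have hpre : (base.map (fun p => p.1)).foldl
        (fun st u => (PySem.Dict.getD adj u []).foldl (pvStepB u) st) (d, false) = (d, false) := by
      apply pvNoopMany
      intro u hu w hw
      obtain ⟨p, hp, rfl⟩ := List.mem_map.mp hu
      exact (PySem.Dict.contains_iff_mem_keys d w).mpr (hclosed p hp w hw)
    have hsplit : d.keys.foldl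
        (fun st u => (PySem.Dict.getD adj u []).foldl (pvStepB u) st) (d, false)
        = fr.foldl (fun st u => (PySem.Dict.getD adj u []).foldl (pvStepB u) st) (d, false) := by
      rw [hkeys, List.foldl_append, hpre]
    obtain ⟨s1, s2, s3, s4, s5⟩ :=
      pvOuterSim adj l fr d [] false d.items hnd (by simp) (by simp) hfrget
    rw [pvFix]
    simp only [hsplit]
    rw [pvBfsF]
    cases fr with
    | nil =>
      have hB : (([] : List Int).foldl
          (fun st u => (PySem.Dict.getD adj u []).foldl (pvStepB u) st) (d, false)) = (d, false) := rfl
      rw [hB]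
      simp only [List.isEmpty_nil, if_true, Bool.not_true, Bool.or_false]
      rw [dif_neg (by decide)]
      rw [hitems]
      simp
    | cons f fs =>
      have hmapany : ∀ (b : Bool), ((f :: fs).any (fun node =>
          (PySem.Int.mod l 2 == 0) == (PySem.Int.mod node 2 == 0))) = b →
          (((f :: fs).map (fun x => (x, l))).any
            (fun p => PySem.Int.mod p.2 2 == PySem.Int.mod p.1 2)) = b := by
        intro b hb
        have hcomp : ((fun p : Int × Int => PySem.Int.mod p.2 2 == PySem.Int.mod p.1 2)
              ∘ (fun x : Int => (x, l)))
            = fun node => (PySem.Int.mod l 2 == 0) == (PySem.Int.mod node 2 == 0) := by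
          funext x
          simp only [Function.comp]
          exact (pvBad2 x l).symm
        rw [List.any_map, hcomp, hb]
      simp only [List.isEmpty_cons, Bool.false_eq_true, if_neg, not_false_iff]
      by_cases hbad : ((f :: fs).any (fun node =>
          (PySem.Int.mod l 2 == 0) == (PySem.Int.mod node 2 == 0))) = true
      · simp only [hbad, if_pos, Bool.not_false, Bool.or_true]
        have hfb := hmapany true hbad
        by_cases hc : ((f :: fs).foldl
            (fun st u => (PySem.Dict.getD adj u []).foldl (pvStepB u) st) (d, false)).2 = true
        · rw [dif_pos hc]
          obtain ⟨rest, hrest⟩ := pvFix_items_prefix adj U h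
            (pvUnvis U ((f :: fs).foldl
              (fun st u => (PySem.Dict.getD adj u []).foldl (pvStepB u) st) (d, false)).1.keys)
            _ (le_refl _)
          rw [hrest, s1, hitems]
          simp only [List.any_append, hfb, Bool.or_true, Bool.true_or]
        · rw [dif_neg hc]
          rw [s1, hitems]
          simp only [List.any_append, hfb, Bool.or_true, Bool.true_or]
      · have hbad' : ((f :: fs).any (fun node =>
            (PySem.Int.mod l 2 == 0) == (PySem.Int.mod node 2 == 0))) = false := by
          simpa using hbad
        have hfb := hmapany false hbad'
        simp only [hbad', Bool.false_eq_true, if_neg, not_false_iff]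
        have hm := pvFoldBout_meas adj U h (f :: fs) d.keys []
        simp only [List.length_nil, Nat.add_zero] at hm
        cases hnf : ((f :: fs).foldl (fun (st : List Int × List Int) node =>
            (PySem.Dict.getD adj node []).foldl (fun (st : List Int × List Int) nb =>
              if PySem.Set.contains st.1 nb then st
              else (PySem.Set.add st.1 nb, st.2 ++ [nb])) st) (d.keys, [])).2 with
        | nil =>
          have hcF : ((f :: fs).foldl
              (fun st u => (PySem.Dict.getD adj u []).foldl (pvStepB u) st) (d, false)).2 = false := by
            rw [s3, hnf]; rfl
          rw [dif_neg (by rw [hcF]; exact Bool.false_ne_true)]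
          rw [s1, hnf, hitems]
          rw [pvBfsF]
          simp only [List.isEmpty_nil, if_true, Bool.not_true, Bool.or_false,
            List.any_append, hfb, List.map_nil, List.any_nil]
        | cons g gs =>
          have hcT : ((f :: fs).foldl
              (fun st u => (PySem.Dict.getD adj u []).foldl (pvStepB u) st) (d, false)).2 = true := by
            rw [s3, hnf]; rfl
          rw [dif_pos hcT]
          have hIH := IH (2 * pvUnvis U ((f :: fs).foldl
              (fun st u => (PySem.Dict.getD adj u []).foldl (pvStepB u) st) (d, false)).1.keys
              + (g :: gs).length)
            (by rw [s2, ← hnf] at *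
                simp only [List.length_cons] at hN ⊢
                omega)
            ((f :: fs).foldl
              (fun st u => (PySem.Dict.getD adj u []).foldl (pvStepB u) st) (d, false)).1
            (g :: gs) (l + 1) (base ++ (f :: fs).map (fun x => (x, l)))
            (le_refl _) s4
            (by rw [s1, hnf, hitems, List.append_assoc])
            (by intro p hp w hw
                rw [s2]
                rcases List.mem_append.mp hp with hp1 | hp2
                · exact pvAMonoOut adj (f :: fs) (d.keys, []) w (hclosed p hp1 w hw)
                · obtain ⟨x, hx, rfl⟩ := List.mem_map.mp hp2
                  exact pvACovers adj (f :: fs) (d.keys, []) x hx w hw)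
          rw [hIH, ← hnf, s2]
          simp only [List.any_append, hfb, Bool.or_false]

-- ===== VERDICT (by name: the statement is the Claim_ definition above) =====
theorem check_if_tree_is_valid_spec : Claim_equal_check_if_tree_is_valid := by
  intro n edges _ hpre
  unfold Spec_check_if_tree_is_valid
  unfold check_if_tree_is_valid check_if_tree_is_valid_alt
  by_cases h1 : (n == 1) = true
  · simp [h1]
  · have h1' : (n == 1) = false := by simpa using h1
    simp only [h1', Bool.false_eq_true, if_neg, not_false_iff]
    cases edges with
    | nil =>
      rcases hpre with h | h
      · exact absurd (by simpa using h) h1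
      · exact absurd rfl h
    | cons e rest =>
      obtain ⟨u, w⟩ := e
      have hA := pvMain (pvBuildAdj ((u, w) :: rest)) (pvNodes ((u, w) :: rest))
        (pvAdj_vals ((u, w) :: rest))
        (2 * pvUnvis (pvNodes ((u, w) :: rest)) (PySem.Set.ofList [u]) + 1)
        (PySem.Set.ofList [u]) [u] 0 (by simp)
      have hB := pvMainB (pvBuildAdj ((u, w) :: rest)) (pvNodes ((u, w) :: rest))
        (pvAdj_vals ((u, w) :: rest))
        (2 * pvUnvis (pvNodes ((u, w) :: rest)) (PySem.Dict.ofList [(u, (0 : Int))]).keys + 1)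
        (PySem.Dict.ofList [(u, (0 : Int))]) [u] 0 [] (le_refl _)
        (by show ([u] : List Int).Nodup; simp)
        (by rfl)
        (by intro p hp; simp at hp)
      rw [show ([u].map (fun x => (x, (0 : Int)))) = [(u, (0 : Int))] from rfl] at hA
      rw [show (PySem.Dict.ofList [(u, (0 : Int))]).keys = [u] from rfl] at hB
      refine hA.trans ?_
      show pvBfsF (pvBuildAdj ((u, w) :: rest)) (pvNodes ((u, w) :: rest))
          (pvAdj_vals ((u, w) :: rest)) (PySem.Set.ofList [u]) [u] 0
        = !((pvFix (pvBuildAdj ((u, w) :: rest)) (pvNodes ((u, w) :: rest))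
            (pvAdj_vals ((u, w) :: rest)) (PySem.Dict.ofList [(u, (0 : Int))])).items.any
              fun p => PySem.Int.mod p.2 2 == PySem.Int.mod p.1 2)
      rw [hB]
      simp only [List.any_nil, Bool.false_or, Bool.not_not]
      rfl
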